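-- pv_equiv track=rewrite | github.com/perfettiful/folyhedra.fun | platonic_counts.py | connected_on_used
-- ===== SOURCE A (Python) =====
-- def connected_on_used(nV, subset_edges):
--     used = sorted(set([u for e in subset_edges for u in e]))
--     if not used: return True
--     idmap={v:i for i,v in enumerate(used)}
--     g=[set() for _ in used]
--     for a,b in subset_edges:
--         ia,ib=idmap[a],idmap[b]
--         g[ia].add(ib); g[ib].add(ia)
--     seen={0}; stack=[0]
--     while stack:
--         u=stack.pop()
--         for w in g[u]:
--             if w not in seen: seen.add(w); stack.append(w)
--     return len(seen)==len(used)
-- ===== SOURCE B (Python) =====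
-- def connected_on_used(nV, subset_edges):
--     # Edge-saturation fixpoint instead of DFS: no adjacency list, no index map, no stack.
--     used = {u for e in subset_edges for u in e}
--     if not used:
--         return True
--     reach = {min(used)}
--     changed = True
--     while changed:
--         changed = False
--         for a, b in subset_edges:
--             if a in reach and b not in reach:
--                 reach.add(b)
--                 changed = True
--             elif b in reach and a not in reach:
--                 reach.add(a)
--                 changed = True
--     return len(reach) == len(used)
-- ===== Notes on version B (the rewrite author's own statement) =====
-- stated objective: alternative
-- what changed: Replaces A's sorted-vertex index map + adjacency-list + explicit-stack DFS with a direct edge-saturation fixpoint: grow the reachable set of the minimum used vertex by re-scanning the edge list until no edge adds a vertex, then compare its size with the number of used vertices.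
import Mathlib
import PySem

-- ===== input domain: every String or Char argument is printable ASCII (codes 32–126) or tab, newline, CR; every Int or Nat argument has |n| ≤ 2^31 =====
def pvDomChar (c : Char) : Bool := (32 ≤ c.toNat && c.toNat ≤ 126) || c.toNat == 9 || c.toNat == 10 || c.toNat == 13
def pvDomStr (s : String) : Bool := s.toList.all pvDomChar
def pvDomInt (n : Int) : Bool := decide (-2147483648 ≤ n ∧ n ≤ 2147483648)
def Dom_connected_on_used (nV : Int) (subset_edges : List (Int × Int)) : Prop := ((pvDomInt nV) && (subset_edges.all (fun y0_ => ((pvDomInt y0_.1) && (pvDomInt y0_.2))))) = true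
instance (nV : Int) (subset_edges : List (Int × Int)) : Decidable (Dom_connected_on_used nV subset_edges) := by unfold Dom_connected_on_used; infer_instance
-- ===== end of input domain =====

-- B replaces A's sorted-index-map + adjacency-list + stack DFS by an edge-saturation
-- fixpoint over vertex labels; equivalence: both decide "all used vertices connected".

-- ===== PORT A =====
-- Termination helpers for the ports' while-loops (cited by decreasing_by); the
-- measures are ours, not part of the Python code.

theorem pv_countP_lt {α : Type} (F : List α) (p q : α → Bool)
    (hpq : ∀ x, q x = true → p x = true) (w : α) (hw : w ∈ F)
    (hp : p w = true) (hq : q w = false) : F.countP q < F.countP p := by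
  induction F with
  | nil => cases hw
  | cons a t ih =>
    simp only [List.countP_cons]
    rcases List.mem_cons.mp hw with rfl | hw'
    · have h1 : t.countP q ≤ t.countP p :=
        List.countP_mono_left (fun x _ hx => hpq x hx)
      simp only [hp, hq]; simp; omega
    · have h1 := ih hw'
      have h2 : (if q a = true then 1 else 0) ≤ (if p a = true then 1 else 0) := by
        by_cases h : q a = true
        · simp [h, hpq a h]
        · simp [h]
      omega

-- one step of A's inner 'for w in g[u]' loop
def dfsStep (st : PySem.Set Int × List Int) (w : Int) : PySem.Set Int × List Int :=
  if !(PySem.Set.contains st.1 w) then (PySem.Set.add st.1 w, st.2 ++ [w]) else st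

def dfsMeasure (g : List (PySem.Set Int)) (seen : PySem.Set Int) (stack : List Int) : Nat :=
  2 * ((PySem.Set.ofList g.flatten).countP (fun w => decide (w ∉ seen))) + stack.length

theorem dfsFold_measure (F ws : List Int) (hws : ∀ w ∈ ws, w ∈ F)
    (seen : PySem.Set Int) (stack : List Int) :
    2 * F.countP (fun w => decide (w ∉ (ws.foldl dfsStep (seen, stack)).1))
        + (ws.foldl dfsStep (seen, stack)).2.length
      ≤ 2 * F.countP (fun w => decide (w ∉ seen)) + stack.length := by
  induction ws generalizing seen stack with
  | nil => simp
  | cons w t ih =>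
    simp only [List.foldl_cons]
    have hwF := hws w (by simp)
    have ht : ∀ x ∈ t, x ∈ F := fun x hx => hws x (by simp [hx])
    by_cases hm : w ∈ seen
    · have hstep : dfsStep (seen, stack) w = (seen, stack) := by simp [dfsStep, hm]
      simp only [hstep]; exact ih ht seen stack
    · have hstep : dfsStep (seen, stack) w = (PySem.Set.add seen w, stack ++ [w]) := by
        simp [dfsStep, hm]
      simp only [hstep]
      have h1 := ih ht (PySem.Set.add seen w) (stack ++ [w])
      have hlt : F.countP (fun x => decide (x ∉ PySem.Set.add seen w))
          < F.countP (fun x => decide (x ∉ seen)) := by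
        refine pv_countP_lt F _ _ (fun x hx => ?_) w hwF (by simpa using hm) (by simp [PySem.Set.mem_add])
        simp only [decide_eq_true_eq] at hx ⊢
        exact fun hxs => hx ((PySem.Set.mem_add seen w x).mpr (Or.inl hxs))
      have hlen : (stack ++ [w]).length = stack.length + 1 := by simp
      omega

theorem mem_pyGetD_flatten (g : List (PySem.Set Int)) (u : Int) :
    ∀ w ∈ PySem.List.pyGetD g u PySem.Set.empty, w ∈ g.flatten := by
  intro w hw
  simp only [PySem.List.pyGetD] at hw
  cases hg : PySem.List.pyGet? g u with
  | none => rw [hg] at hw; cases hw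
  | some s =>
    rw [hg] at hw
    exact List.mem_flatten.mpr ⟨s, PySem.List.mem_of_pyGet?_eq_some _ hg, hw⟩

-- A's 'while stack:' loop; pops from the back, as Python's list.pop() does.
def dfsLoop (g : List (PySem.Set Int)) (seen : PySem.Set Int) (stack : List Int) : PySem.Set Int :=
  if h : stack = [] then seen
  else
    dfsLoop g
      ((PySem.List.pyGetD g (stack.getLast h) PySem.Set.empty).foldl dfsStep (seen, stack.dropLast)).1
      ((PySem.List.pyGetD g (stack.getLast h) PySem.Set.empty).foldl dfsStep (seen, stack.dropLast)).2
termination_by dfsMeasure g seen stack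
decreasing_by
  have hws : ∀ w ∈ PySem.List.pyGetD g (stack.getLast h) PySem.Set.empty,
      w ∈ PySem.Set.ofList g.flatten := by
    intro w hw
    rw [PySem.Set.mem_ofList]
    exact mem_pyGetD_flatten g _ w hw
  have h1 := dfsFold_measure _ _ hws seen stack.dropLast
  have h2 : stack.dropLast.length + 1 = stack.length := by
    have hpos : 0 < stack.length := List.length_pos_iff.mpr h
    simp [List.length_dropLast]; omega
  simp only [dfsMeasure]
  omega

-- builds A's adjacency lists: g[ia].add(ib); g[ib].add(ia).  The dict keys are always
-- present (edge endpoints are elements of used) and its values are the indices 0..N-1,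
-- hence nonnegative, so getD 0 / .toNat are exact here.
def gStep (idmap : PySem.Dict Int Int) (g : List (PySem.Set Int)) (e : Int × Int) : List (PySem.Set Int) :=
  let ia := PySem.Dict.getD idmap e.1 0
  let ib := PySem.Dict.getD idmap e.2 0
  let g1 := g.set ia.toNat (PySem.Set.add (PySem.List.pyGetD g ia PySem.Set.empty) ib)
  g1.set ib.toNat (PySem.Set.add (PySem.List.pyGetD g1 ib PySem.Set.empty) ia)

-- A iterates 'for w in g[u]' over a set; the returned boolean (len(seen)==len(used))
-- does not depend on that iteration order, so the insertion-order list is exact here.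
def connected_on_used (nV : Int) (subset_edges : List (Int × Int)) : Bool :=
  let used : List Int :=
    PySem.List.sorted (PySem.Set.ofList (subset_edges.flatMap (fun e => [e.1, e.2]))) (fun x => x) false
  if used = [] then true
  else
    let idmap : PySem.Dict Int Int :=
      (PySem.List.enumerate used).foldl (fun d p => d.insert p.2 p.1) PySem.Dict.empty
    let g0 : List (PySem.Set Int) := used.map (fun _ => PySem.Set.empty)
    let g := subset_edges.foldl (gStep idmap) g0
    let seen := dfsLoop g (PySem.Set.ofList [0]) [0]
    decide (seen.length = used.length)

-- ===== PORT B =====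
theorem notMem_add_mono (s : PySem.Set Int) (y : Int) :
    ∀ x, decide (x ∉ PySem.Set.add s y) = true → decide (x ∉ s) = true := by
  intro x hx
  simp only [decide_eq_true_eq] at hx ⊢
  exact fun h => hx ((PySem.Set.mem_add s y x).mpr (Or.inl h))

theorem countP_notMem_add_lt (F : List Int) (s : PySem.Set Int) (y : Int)
    (hyF : y ∈ F) (hy : y ∉ s) :
    F.countP (fun x => decide (x ∉ PySem.Set.add s y)) < F.countP (fun x => decide (x ∉ s)) :=
  pv_countP_lt F _ _ (notMem_add_mono s y) y hyF (by simpa using hy) (by simp [PySem.Set.mem_add])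

-- one step of B's 'for a, b in subset_edges' pass
def bStep (st : PySem.Set Int × Bool) (e : Int × Int) : PySem.Set Int × Bool :=
  if PySem.Set.contains st.1 e.1 && !(PySem.Set.contains st.1 e.2) then (PySem.Set.add st.1 e.2, true)
  else if PySem.Set.contains st.1 e.2 && !(PySem.Set.contains st.1 e.1) then (PySem.Set.add st.1 e.1, true)
  else st

theorem bFold_measure (F : List Int) (edges : List (Int × Int))
    (hE : ∀ e ∈ edges, e.1 ∈ F ∧ e.2 ∈ F) (reach : PySem.Set Int) (c : Bool) :
    F.countP (fun v => decide (v ∉ (edges.foldl bStep (reach, c)).1))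
        ≤ F.countP (fun v => decide (v ∉ reach)) ∧
    ((edges.foldl bStep (reach, c)).2 = true → c = true ∨
      F.countP (fun v => decide (v ∉ (edges.foldl bStep (reach, c)).1))
        < F.countP (fun v => decide (v ∉ reach))) := by
  induction edges generalizing reach c with
  | nil => simp
  | cons e t ih =>
    simp only [List.foldl_cons]
    have ht : ∀ x ∈ t, x.1 ∈ F ∧ x.2 ∈ F := fun x hx => hE x (by simp [hx])
    by_cases h1 : (PySem.Set.contains reach e.1 && !(PySem.Set.contains reach e.2)) = true
    · have hstep : bStep (reach, c) e = (PySem.Set.add reach e.2, true) := by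
        simp only [bStep]; rw [if_pos h1]
      simp only [hstep]
      have hm2 : e.2 ∉ reach := by
        have h2 : PySem.Set.contains reach e.2 = false := by
          cases hcb : PySem.Set.contains reach e.2
          · rfl
          · rw [hcb] at h1; simp at h1
        intro hc
        exact Bool.false_ne_true (h2 ▸ (PySem.Set.contains_iff _ _).mpr hc)
      have hlt := countP_notMem_add_lt F reach e.2 ((hE e (by simp)).2) hm2
      have hI := ih ht (PySem.Set.add reach e.2) true
      exact ⟨le_trans hI.1 (le_of_lt hlt), fun _ => Or.inr (lt_of_le_of_lt hI.1 hlt)⟩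
    · by_cases h2 : (PySem.Set.contains reach e.2 && !(PySem.Set.contains reach e.1)) = true
      · have hstep : bStep (reach, c) e = (PySem.Set.add reach e.1, true) := by
          simp only [bStep]; rw [if_neg h1, if_pos h2]
        simp only [hstep]
        have hm1 : e.1 ∉ reach := by
          have h2' : PySem.Set.contains reach e.1 = false := by
            cases hcb : PySem.Set.contains reach e.1
            · rfl
            · rw [hcb] at h2; simp at h2
          intro hc
          exact Bool.false_ne_true (h2' ▸ (PySem.Set.contains_iff _ _).mpr hc)
        have hlt := countP_notMem_add_lt F reach e.1 ((hE e (by simp)).1) hm1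
        have hI := ih ht (PySem.Set.add reach e.1) true
        exact ⟨le_trans hI.1 (le_of_lt hlt), fun _ => Or.inr (lt_of_le_of_lt hI.1 hlt)⟩
      · have hstep : bStep (reach, c) e = (reach, c) := by
          simp only [bStep]; rw [if_neg h1, if_neg h2]
        simp only [hstep]
        exact ih ht reach c

-- B's 'while changed:' loop
def bloop (subset_edges : List (Int × Int)) (reach : PySem.Set Int) : PySem.Set Int :=
  if (subset_edges.foldl bStep (reach, false)).2 then
    bloop subset_edges (subset_edges.foldl bStep (reach, false)).1
  else (subset_edges.foldl bStep (reach, false)).1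
termination_by (PySem.Set.ofList (subset_edges.flatMap (fun e => [e.1, e.2]))).countP (fun v => decide (v ∉ reach))
decreasing_by
  rename_i hst
  have hE : ∀ e ∈ subset_edges,
      e.1 ∈ PySem.Set.ofList (subset_edges.flatMap (fun e => [e.1, e.2])) ∧
      e.2 ∈ PySem.Set.ofList (subset_edges.flatMap (fun e => [e.1, e.2])) := by
    intro e he
    constructor <;> (rw [PySem.Set.mem_ofList]; exact List.mem_flatMap.mpr ⟨e, he, by simp⟩)
  have h := bFold_measure _ subset_edges hE reach false
  try simp only [List.foldl_attach] at hst
  try simp only [List.foldl_attach]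
  rcases h.2 hst with h' | h'
  · cases h'
  · exact h'

-- B: grow the reachable set of min(used) by rescanning the edges until stable.
def connected_on_used_alt (nV : Int) (subset_edges : List (Int × Int)) : Bool :=
  let used : PySem.Set Int := PySem.Set.ofList (subset_edges.flatMap (fun e => [e.1, e.2]))
  if used = [] then true
  else
    -- used ≠ [], so min? is some; the default is never used
    let m := (PySem.List.min? used (fun x => x)).getD 0
    let reach := bloop subset_edges (PySem.Set.ofList [m])
    decide (reach.length = used.length)

-- ===== PRECONDITION & SPEC =====
def Spec_connected_on_used (nV : Int) (subset_edges : List (Int × Int)) (out : Bool) : Prop := out = connected_on_used_alt nV subset_edges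
instance (nV : Int) (subset_edges : List (Int × Int)) (out : Bool) : Decidable (Spec_connected_on_used nV subset_edges out) := by unfold Spec_connected_on_used; infer_instance

-- ===== CLAIM (what is proved, stated in full; the proofs are below) =====
def Claim_equal_connected_on_used : Prop := ∀ (nV : Int) (subset_edges : List (Int × Int)), Dom_connected_on_used nV subset_edges → Spec_connected_on_used nV subset_edges (connected_on_used nV subset_edges)

-- ===== LEMMAS AND PROOFS =====


-- abstract views of the two programs, used only by the proofs below

def AdjV (edges : List (Int × Int)) (v w : Int) : Prop :=
  ∃ e ∈ edges, (e.1 = v ∧ e.2 = w) ∨ (e.2 = v ∧ e.1 = w)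

def ReachV (edges : List (Int × Int)) : Int → Int → Prop := Relation.ReflTransGen (AdjV edges)

def AdjI (g : List (PySem.Set Int)) (i j : Int) : Prop := j ∈ PySem.List.pyGetD g i PySem.Set.empty

def ReachI (g : List (PySem.Set Int)) : Int → Int → Prop := Relation.ReflTransGen (AdjI g)

def usedOf (edges : List (Int × Int)) : PySem.Set Int :=
  PySem.Set.ofList (edges.flatMap (fun e => [e.1, e.2]))

def usedLOf (edges : List (Int × Int)) : List Int :=
  PySem.List.sorted (usedOf edges) (fun x => x) false

def idmapOf (edges : List (Int × Int)) : PySem.Dict Int Int :=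
  (PySem.List.enumerate (usedLOf edges)).foldl (fun d p => d.insert p.2 p.1) PySem.Dict.empty

def g0Of (edges : List (Int × Int)) : List (PySem.Set Int) :=
  (usedLOf edges).map (fun _ => PySem.Set.empty)

def gFOf (edges : List (Int × Int)) : List (PySem.Set Int) :=
  edges.foldl (gStep (idmapOf edges)) (g0Of edges)

theorem A_val (nV : Int) (edges : List (Int × Int)) : connected_on_used nV edges =
    if usedLOf edges = [] then true
    else decide ((dfsLoop (gFOf edges) (PySem.Set.ofList [0]) [0]).length = (usedLOf edges).length) := rfl

theorem B_val (nV : Int) (edges : List (Int × Int)) : connected_on_used_alt nV edges =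
    if usedOf edges = [] then true
    else decide ((bloop edges (PySem.Set.ofList [(PySem.List.min? (usedOf edges) (fun x => x)).getD 0])).length = (usedOf edges).length) := rfl

-- ---------- B-side: bloop computes the ReachV-closure ----------

theorem bStep_flag (st : PySem.Set Int × Bool) (e : Int × Int) (h : st.2 = true) :
    (bStep st e).2 = true := by
  simp only [bStep]; split_ifs <;> simp [h]

theorem bFold_flag (edges : List (Int × Int)) :
    ∀ st : PySem.Set Int × Bool, st.2 = true → (edges.foldl bStep st).2 = true := by
  induction edges with
  | nil => intro st h; simpa using h
  | cons e t ih => intro st h; simp only [List.foldl_cons]; exact ih _ (bStep_flag st e h)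

theorem bStep_subset (st : PySem.Set Int × Bool) (e : Int × Int) :
    ∀ v ∈ st.1, v ∈ (bStep st e).1 := by
  intro v hv; simp only [bStep]; split_ifs <;> simp [PySem.Set.mem_add, hv]

theorem bFold_subset (edges : List (Int × Int)) :
    ∀ st, ∀ v ∈ st.1, v ∈ (edges.foldl bStep st).1 := by
  induction edges with
  | nil => intro st v hv; simpa using hv
  | cons e t ih => intro st v hv; simp only [List.foldl_cons]; exact ih _ v (bStep_subset st e v hv)

theorem bStep_sound (edges0 : List (Int × Int)) (root : Int) (st : PySem.Set Int × Bool)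
    (e : Int × Int) (he : e ∈ edges0) (h : ∀ v ∈ st.1, ReachV edges0 root v) :
    ∀ v ∈ (bStep st e).1, ReachV edges0 root v := by
  intro v hv
  simp only [bStep] at hv
  split_ifs at hv with h1 h2
  · rcases (PySem.Set.mem_add _ _ _).mp hv with hv' | rfl
    · exact h v hv'
    · have he1 : e.1 ∈ st.1 := by
        refine (PySem.Set.contains_iff _ _).mp ?_
        cases hca : PySem.Set.contains st.1 e.1
        · rw [hca] at h1; simp at h1
        · rfl
      exact Relation.ReflTransGen.tail (h e.1 he1) ⟨e, he, Or.inl ⟨rfl, rfl⟩⟩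
  · rcases (PySem.Set.mem_add _ _ _).mp hv with hv' | rfl
    · exact h v hv'
    · have he2 : e.2 ∈ st.1 := by
        refine (PySem.Set.contains_iff _ _).mp ?_
        cases hca : PySem.Set.contains st.1 e.2
        · rw [hca] at h2; simp at h2
        · rfl
      exact Relation.ReflTransGen.tail (h e.2 he2) ⟨e, he, Or.inr ⟨rfl, rfl⟩⟩
  · exact h v hv

theorem bFold_sound (edges0 : List (Int × Int)) (root : Int) (edges : List (Int × Int))
    (hsub : ∀ e ∈ edges, e ∈ edges0) :
    ∀ st, (∀ v ∈ st.1, ReachV edges0 root v) →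
      ∀ v ∈ (edges.foldl bStep st).1, ReachV edges0 root v := by
  induction edges with
  | nil => intro st h; simpa using h
  | cons e t ih =>
    intro st h
    simp only [List.foldl_cons]
    exact ih (fun x hx => hsub x (by simp [hx])) _
      (bStep_sound edges0 root st e (hsub e (by simp)) h)

theorem bStep_nodup (st : PySem.Set Int × Bool) (e : Int × Int) (h : st.1.Nodup) :
    (bStep st e).1.Nodup := by
  simp only [bStep]
  split_ifs <;> first | exact PySem.Set.nodup_add _ _ h | exact h

theorem bFold_nodup (edges : List (Int × Int)) :
    ∀ st, st.1.Nodup → (edges.foldl bStep st).1.Nodup := by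
  induction edges with
  | nil => intro st h; simpa using h
  | cons e t ih => intro st h; simp only [List.foldl_cons]; exact ih _ (bStep_nodup st e h)

theorem bFold_stable (edges : List (Int × Int)) :
    ∀ reach, (edges.foldl bStep (reach, false)).2 = false →
      (edges.foldl bStep (reach, false)).1 = reach ∧
      ∀ e ∈ edges, (e.1 ∈ reach → e.2 ∈ reach) ∧ (e.2 ∈ reach → e.1 ∈ reach) := by
  induction edges with
  | nil => intro reach _; simp
  | cons e t ih =>
    intro reach h
    simp only [List.foldl_cons] at h ⊢
    by_cases h1 : (PySem.Set.contains reach e.1 && !(PySem.Set.contains reach e.2)) = true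
    · exfalso
      have hstep : bStep (reach, false) e = (PySem.Set.add reach e.2, true) := by
        simp only [bStep]; rw [if_pos h1]
      rw [hstep] at h
      have hT := bFold_flag t (PySem.Set.add reach e.2, true) rfl
      rw [h] at hT
      exact Bool.false_ne_true hT
    · by_cases h2 : (PySem.Set.contains reach e.2 && !(PySem.Set.contains reach e.1)) = true
      · exfalso
        have hstep : bStep (reach, false) e = (PySem.Set.add reach e.1, true) := by
          simp only [bStep]; rw [if_neg h1, if_pos h2]
        rw [hstep] at h
        have hT := bFold_flag t (PySem.Set.add reach e.1, true) rfl
        rw [h] at hT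
        exact Bool.false_ne_true hT
      · have hstep : bStep (reach, false) e = (reach, false) := by
          simp only [bStep]; rw [if_neg h1, if_neg h2]
        rw [hstep] at h
        have hI := ih reach h
        rw [hstep]
        refine ⟨hI.1, ?_⟩
        intro e' he'
        rcases List.mem_cons.mp he' with rfl | he''
        · constructor
          · intro hm1
            by_contra hm2
            apply h1
            have c1 : PySem.Set.contains reach e'.1 = true := (PySem.Set.contains_iff _ _).mpr hm1
            have c2 : PySem.Set.contains reach e'.2 = false := by
              by_contra hc
              exact hm2 ((PySem.Set.contains_iff _ _).mp (by simpa using hc))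
            rw [c1, c2]; rfl
          · intro hm2
            by_contra hm1
            apply h2
            have c2 : PySem.Set.contains reach e'.2 = true := (PySem.Set.contains_iff _ _).mpr hm2
            have c1 : PySem.Set.contains reach e'.1 = false := by
              by_contra hc
              exact hm1 ((PySem.Set.contains_iff _ _).mp (by simpa using hc))
            rw [c1, c2]; rfl
        · exact hI.2 e' he''

theorem endpoints_usedOf (edges : List (Int × Int)) :
    ∀ e ∈ edges, e.1 ∈ usedOf edges ∧ e.2 ∈ usedOf edges := by
  intro e he
  constructor <;>
    (unfold usedOf; rw [PySem.Set.mem_ofList]; exact List.mem_flatMap.mpr ⟨e, he, by simp⟩)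

theorem bloop_measure_lt (edges : List (Int × Int)) (reach : PySem.Set Int)
    (hf : (edges.foldl bStep (reach, false)).2 = true) :
    (usedOf edges).countP (fun v => decide (v ∉ (edges.foldl bStep (reach, false)).1)) <
    (usedOf edges).countP (fun v => decide (v ∉ reach)) := by
  have h := bFold_measure (usedOf edges) edges (endpoints_usedOf edges) reach false
  rcases h.2 hf with h' | h'
  · cases h'
  · exact h'

theorem bloop_ind (edges : List (Int × Int)) (Inv : PySem.Set Int → Prop)
    (hstep : ∀ reach, Inv reach → Inv (edges.foldl bStep (reach, false)).1) :
    ∀ reach, Inv reach →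
      Inv (bloop edges reach) ∧ (edges.foldl bStep (bloop edges reach, false)).2 = false := by
  have main : ∀ n reach, (usedOf edges).countP (fun v => decide (v ∉ reach)) ≤ n → Inv reach →
      Inv (bloop edges reach) ∧ (edges.foldl bStep (bloop edges reach, false)).2 = false := by
    intro n
    induction n using Nat.strong_induction_on with
    | _ n ih =>
      intro reach hn hInv
      by_cases hf : (edges.foldl bStep (reach, false)).2 = true
      · have heq : bloop edges reach = bloop edges (edges.foldl bStep (reach, false)).1 := by
          rw [bloop.eq_def, if_pos hf]
        rw [heq]
        have hlt := bloop_measure_lt edges reach hf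
        exact ih ((usedOf edges).countP (fun v => decide (v ∉ (edges.foldl bStep (reach, false)).1)))
          (lt_of_lt_of_le hlt hn) _ le_rfl (hstep reach hInv)
      · have hf' : (edges.foldl bStep (reach, false)).2 = false := by
          cases hx : (edges.foldl bStep (reach, false)).2
          · rfl
          · exact absurd hx hf
        have hfix := (bFold_stable edges reach hf').1
        have heq : bloop edges reach = reach := by
          rw [bloop.eq_def, if_neg hf]
          exact hfix
        rw [heq]
        exact ⟨hInv, hf'⟩
  exact fun reach hInv => main _ reach le_rfl hInv

theorem bloop_subset (edges : List (Int × Int)) :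
    ∀ reach, ∀ v ∈ reach, v ∈ bloop edges reach := by
  intro reach
  exact (bloop_ind edges (fun r => ∀ v ∈ reach, v ∈ r)
    (fun r h v hv => bFold_subset edges (r, false) v (h v hv)) reach (fun v hv => hv)).1

theorem bloop_sound (edges : List (Int × Int)) (root : Int) :
    ∀ reach, (∀ v ∈ reach, ReachV edges root v) →
      ∀ v ∈ bloop edges reach, ReachV edges root v := by
  intro reach h
  exact (bloop_ind edges (fun r => ∀ v ∈ r, ReachV edges root v)
    (fun r hr => bFold_sound edges root edges (fun e he => he) (r, false) hr) reach h).1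

theorem bloop_nodup (edges : List (Int × Int)) :
    ∀ reach, reach.Nodup → (bloop edges reach).Nodup := by
  intro reach h
  exact (bloop_ind edges (fun r => r.Nodup)
    (fun r hr => bFold_nodup edges (r, false) hr) reach h).1

theorem bloop_closed (edges : List (Int × Int)) :
    ∀ reach, ∀ e ∈ edges,
      (e.1 ∈ bloop edges reach → e.2 ∈ bloop edges reach) ∧
      (e.2 ∈ bloop edges reach → e.1 ∈ bloop edges reach) := by
  intro reach e he
  have hflag := (bloop_ind edges (fun _ => True) (fun _ _ => trivial) reach trivial).2
  exact (bFold_stable edges (bloop edges reach) hflag).2 e he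

theorem bloop_complete (edges : List (Int × Int)) (root : Int) :
    ∀ reach, root ∈ reach → ∀ v, ReachV edges root v → v ∈ bloop edges reach := by
  intro reach hroot v hv
  induction hv with
  | refl => exact bloop_subset edges reach root hroot
  | tail _ hbc ih =>
    rcases hbc with ⟨e, he, hcase⟩
    rcases hcase with ⟨h1, h2⟩ | ⟨h1, h2⟩
    · exact h2 ▸ (bloop_closed edges reach e he).1 (h1 ▸ ih)
    · exact h2 ▸ (bloop_closed edges reach e he).2 (h1 ▸ ih)

-- ---------- A-side: small-step lemmas about the DFS inner fold ----------

theorem dfsStep_seen_subset (st : PySem.Set Int × List Int) (w : Int) :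
    ∀ v ∈ st.1, v ∈ (dfsStep st w).1 := by
  intro v hv; simp only [dfsStep]; split_ifs <;> simp [PySem.Set.mem_add, hv]

theorem dfsStep_stack_subset (st : PySem.Set Int × List Int) (w : Int) :
    ∀ v ∈ st.2, v ∈ (dfsStep st w).2 := by
  intro v hv; simp only [dfsStep]; split_ifs <;> simp [hv]

theorem dfsStep_seen_mem (st : PySem.Set Int × List Int) (w : Int) :
    ∀ v ∈ (dfsStep st w).1, v ∈ st.1 ∨ v = w := by
  intro v hv; simp only [dfsStep] at hv; split_ifs at hv
  · exact (PySem.Set.mem_add _ _ _).mp hv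
  · exact Or.inl hv

theorem dfsStep_stack_mem (st : PySem.Set Int × List Int) (w : Int) :
    ∀ v ∈ (dfsStep st w).2, v ∈ st.2 ∨ v = w := by
  intro v hv; simp only [dfsStep] at hv; split_ifs at hv
  · rcases List.mem_append.mp hv with h | h
    · exact Or.inl h
    · exact Or.inr (List.mem_singleton.mp h)
  · exact Or.inl hv

theorem dfsStep_w_seen (st : PySem.Set Int × List Int) (w : Int) : w ∈ (dfsStep st w).1 := by
  simp only [dfsStep]; split_ifs with h
  · simp [PySem.Set.mem_add]
  · exact (PySem.Set.contains_iff _ _).mp (by simpa using h)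

theorem dfsStep_seen_stack (st : PySem.Set Int × List Int) (w : Int) :
    ∀ v ∈ (dfsStep st w).1, v ∈ st.1 ∨ v ∈ (dfsStep st w).2 := by
  intro v hv
  simp only [dfsStep] at hv ⊢
  split_ifs at hv ⊢ with h
  · rcases (PySem.Set.mem_add _ _ _).mp hv with h' | rfl
    · exact Or.inl h'
    · exact Or.inr (by simp)
  · exact Or.inl hv

theorem dfsStep_stack_seen (st : PySem.Set Int × List Int) (w : Int)
    (h : ∀ v ∈ st.2, v ∈ st.1) : ∀ v ∈ (dfsStep st w).2, v ∈ (dfsStep st w).1 := by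
  intro v hv
  rcases dfsStep_stack_mem st w v hv with h' | rfl
  · exact dfsStep_seen_subset st w v (h v h')
  · exact dfsStep_w_seen st v

theorem dfsStep_nodup (st : PySem.Set Int × List Int) (w : Int) (h : st.1.Nodup) :
    (dfsStep st w).1.Nodup := by
  simp only [dfsStep]
  split_ifs <;> first | exact PySem.Set.nodup_add _ _ h | exact h

theorem dfsFold_seen_subset (ws : List Int) :
    ∀ st, ∀ v ∈ st.1, v ∈ (ws.foldl dfsStep st).1 := by
  induction ws with
  | nil => intro st v hv; simpa using hv
  | cons w t ih => intro st v hv; simp only [List.foldl_cons]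
                   exact ih _ v (dfsStep_seen_subset st w v hv)

theorem dfsFold_stack_subset (ws : List Int) :
    ∀ st, ∀ v ∈ st.2, v ∈ (ws.foldl dfsStep st).2 := by
  induction ws with
  | nil => intro st v hv; simpa using hv
  | cons w t ih => intro st v hv; simp only [List.foldl_cons]
                   exact ih _ v (dfsStep_stack_subset st w v hv)

theorem dfsFold_seen_mem (ws : List Int) :
    ∀ st, ∀ v ∈ (ws.foldl dfsStep st).1, v ∈ st.1 ∨ v ∈ ws := by
  induction ws with
  | nil => intro st v hv; exact Or.inl (by simpa using hv)
  | cons w t ih =>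
    intro st v hv
    simp only [List.foldl_cons] at hv
    rcases ih _ v hv with h | h
    · rcases dfsStep_seen_mem st w v h with h' | rfl
      · exact Or.inl h'
      · exact Or.inr (by simp)
    · exact Or.inr (by simp [h])

theorem dfsFold_stack_mem (ws : List Int) :
    ∀ st, ∀ v ∈ (ws.foldl dfsStep st).2, v ∈ st.2 ∨ v ∈ ws := by
  induction ws with
  | nil => intro st v hv; exact Or.inl (by simpa using hv)
  | cons w t ih =>
    intro st v hv
    simp only [List.foldl_cons] at hv
    rcases ih _ v hv with h | h
    · rcases dfsStep_stack_mem st w v h with h' | rfl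
      · exact Or.inl h'
      · exact Or.inr (by simp)
    · exact Or.inr (by simp [h])

theorem dfsFold_ws_seen (ws : List Int) :
    ∀ st, ∀ w ∈ ws, w ∈ (ws.foldl dfsStep st).1 := by
  induction ws with
  | nil => intro st w hw; cases hw
  | cons w t ih =>
    intro st x hx
    simp only [List.foldl_cons]
    rcases List.mem_cons.mp hx with rfl | hx'
    · exact dfsFold_seen_subset t _ x (dfsStep_w_seen st x)
    · exact ih _ x hx'

theorem dfsFold_seen_stack (ws : List Int) :
    ∀ st, ∀ v ∈ (ws.foldl dfsStep st).1, v ∈ st.1 ∨ v ∈ (ws.foldl dfsStep st).2 := by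
  induction ws with
  | nil => intro st v hv; exact Or.inl (by simpa using hv)
  | cons w t ih =>
    intro st v hv
    simp only [List.foldl_cons] at hv ⊢
    rcases ih _ v hv with h | h
    · rcases dfsStep_seen_stack st w v h with h' | h'
      · exact Or.inl h'
      · exact Or.inr (dfsFold_stack_subset t _ v h')
    · exact Or.inr h

theorem dfsFold_stack_seen (ws : List Int) :
    ∀ st, (∀ v ∈ st.2, v ∈ st.1) →
      ∀ v ∈ (ws.foldl dfsStep st).2, v ∈ (ws.foldl dfsStep st).1 := by
  induction ws with
  | nil => intro st h v hv; exact h v hv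
  | cons w t ih =>
    intro st h v hv
    simp only [List.foldl_cons] at hv ⊢
    exact ih _ (dfsStep_stack_seen st w h) v hv

theorem dfsFold_nodup (ws : List Int) :
    ∀ st, st.1.Nodup → (ws.foldl dfsStep st).1.Nodup := by
  induction ws with
  | nil => intro st h; simpa using h
  | cons w t ih => intro st h; simp only [List.foldl_cons]; exact ih _ (dfsStep_nodup st w h)

-- ---------- A-side: dfsLoop computes the ReachI-closure ----------

theorem dfs_measure_lt (g : List (PySem.Set Int)) (seen : PySem.Set Int) (stack : List Int)
    (h : stack ≠ []) :
    dfsMeasure g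
      ((PySem.List.pyGetD g (stack.getLast h) PySem.Set.empty).foldl dfsStep (seen, stack.dropLast)).1
      ((PySem.List.pyGetD g (stack.getLast h) PySem.Set.empty).foldl dfsStep (seen, stack.dropLast)).2
    < dfsMeasure g seen stack := by
  have hws : ∀ w ∈ PySem.List.pyGetD g (stack.getLast h) PySem.Set.empty,
      w ∈ PySem.Set.ofList g.flatten := by
    intro w hw
    rw [PySem.Set.mem_ofList]
    exact mem_pyGetD_flatten g _ w hw
  have h1 := dfsFold_measure _ _ hws seen stack.dropLast
  have h2 : stack.dropLast.length + 1 = stack.length := by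
    have hpos : 0 < stack.length := List.length_pos_iff.mpr h
    simp [List.length_dropLast]; omega
  simp only [dfsMeasure]
  omega

theorem dfsLoop_ind (g : List (PySem.Set Int)) (Inv : PySem.Set Int → List Int → Prop)
    (hstep : ∀ seen stack (h : stack ≠ []), Inv seen stack →
      Inv ((PySem.List.pyGetD g (stack.getLast h) PySem.Set.empty).foldl dfsStep (seen, stack.dropLast)).1
          ((PySem.List.pyGetD g (stack.getLast h) PySem.Set.empty).foldl dfsStep (seen, stack.dropLast)).2) :
    ∀ seen stack, Inv seen stack → Inv (dfsLoop g seen stack) [] := by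
  have main : ∀ n seen stack, dfsMeasure g seen stack ≤ n → Inv seen stack →
      Inv (dfsLoop g seen stack) [] := by
    intro n
    induction n using Nat.strong_induction_on with
    | _ n ih =>
      intro seen stack hn hInv
      by_cases h : stack = []
      · subst h
        rw [dfsLoop.eq_def, dif_pos rfl]
        exact hInv
      · have heq : dfsLoop g seen stack = dfsLoop g
            ((PySem.List.pyGetD g (stack.getLast h) PySem.Set.empty).foldl dfsStep (seen, stack.dropLast)).1
            ((PySem.List.pyGetD g (stack.getLast h) PySem.Set.empty).foldl dfsStep (seen, stack.dropLast)).2 := by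
          rw [dfsLoop.eq_def, dif_neg h]
        rw [heq]
        exact ih _ (lt_of_lt_of_le (dfs_measure_lt g seen stack h) hn) _ _ le_rfl
          (hstep seen stack h hInv)
  exact fun seen stack hInv => main _ seen stack le_rfl hInv

theorem dfsLoop_subset (g : List (PySem.Set Int)) :
    ∀ seen stack, ∀ v ∈ seen, v ∈ dfsLoop g seen stack := by
  intro seen stack
  exact dfsLoop_ind g (fun s _ => ∀ v ∈ seen, v ∈ s)
    (fun s st h hInv v hv => dfsFold_seen_subset _ (s, st.dropLast) v (hInv v hv))
    seen stack (fun v hv => hv)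

theorem dfsLoop_mem (g : List (PySem.Set Int)) :
    ∀ seen stack, ∀ v ∈ dfsLoop g seen stack, v ∈ seen ∨ v ∈ g.flatten := by
  intro seen stack
  exact dfsLoop_ind g (fun s _ => ∀ v ∈ s, v ∈ seen ∨ v ∈ g.flatten)
    (fun s st h hInv v hv => by
      rcases dfsFold_seen_mem _ (s, st.dropLast) v hv with h' | h'
      · exact hInv v h'
      · exact Or.inr (mem_pyGetD_flatten g _ v h'))
    seen stack (fun v hv => Or.inl hv)

theorem dfsLoop_sound (g : List (PySem.Set Int)) (root : Int) :
    ∀ seen stack, (∀ v ∈ seen, ReachI g root v) → (∀ v ∈ stack, ReachI g root v) →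
      ∀ v ∈ dfsLoop g seen stack, ReachI g root v := by
  intro seen stack hseen hstack
  have h := dfsLoop_ind g
    (fun s st => (∀ v ∈ s, ReachI g root v) ∧ (∀ v ∈ st, ReachI g root v))
    (fun s st h hInv => by
      have hu : ReachI g root (st.getLast h) := hInv.2 _ (List.getLast_mem h)
      have hws : ∀ w ∈ PySem.List.pyGetD g (st.getLast h) PySem.Set.empty, ReachI g root w :=
        fun w hw => Relation.ReflTransGen.tail hu hw
      constructor
      · intro v hv
        rcases dfsFold_seen_mem _ (s, st.dropLast) v hv with h' | h'
        · exact hInv.1 v h'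
        · exact hws v h'
      · intro v hv
        rcases dfsFold_stack_mem _ (s, st.dropLast) v hv with h' | h'
        · exact hInv.2 v (List.dropLast_subset st h')
        · exact hws v h')
    seen stack ⟨hseen, hstack⟩
  exact h.1

theorem dfsLoop_closed (g : List (PySem.Set Int)) :
    ∀ seen stack, (∀ v ∈ stack, v ∈ seen) →
      (∀ v ∈ seen, v ∉ stack → ∀ w ∈ PySem.List.pyGetD g v PySem.Set.empty, w ∈ seen) →
      ∀ v ∈ dfsLoop g seen stack, ∀ w ∈ PySem.List.pyGetD g v PySem.Set.empty,
        w ∈ dfsLoop g seen stack := by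
  intro seen stack hss hinv
  have h := dfsLoop_ind g
    (fun s st => (∀ v ∈ st, v ∈ s) ∧
      (∀ v ∈ s, v ∉ st → ∀ w ∈ PySem.List.pyGetD g v PySem.Set.empty, w ∈ s))
    (fun s st h hInv => by
      constructor
      · intro v hv
        apply dfsFold_stack_seen _ (s, st.dropLast) _ v hv
        intro x hx
        exact hInv.1 x (List.dropLast_subset st hx)
      · intro v hv hvnot w hw
        by_cases hvseen : v ∈ s
        · by_cases hvst : v ∈ st
          · have hsplit : v ∈ st.dropLast ∨ v = st.getLast h := by
              have := List.dropLast_append_getLast h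
              rw [← this] at hvst
              rcases List.mem_append.mp hvst with h' | h'
              · exact Or.inl h'
              · exact Or.inr (List.mem_singleton.mp h')
            rcases hsplit with h' | rfl
            · exact absurd (dfsFold_stack_subset _ (s, st.dropLast) v h') hvnot
            · exact dfsFold_ws_seen _ (s, st.dropLast) w hw
          · exact dfsFold_seen_subset _ (s, st.dropLast) w (hInv.2 v hvseen hvst w hw)
        · rcases dfsFold_seen_stack _ (s, st.dropLast) v hv with h' | h'
          · exact absurd h' hvseen
          · exact absurd h' hvnot)
    seen stack ⟨hss, hinv⟩
  intro v hv hw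
  exact h.2 v hv (by simp) hw

theorem dfsLoop_nodup (g : List (PySem.Set Int)) :
    ∀ seen stack, seen.Nodup → (dfsLoop g seen stack).Nodup := by
  intro seen stack h
  exact dfsLoop_ind g (fun s _ => s.Nodup)
    (fun s st hne hInv => dfsFold_nodup _ (s, st.dropLast) hInv) seen stack h


-- ---------- A-side: the index map, the adjacency lists, and the bridge ----------

theorem usedL_nodup (edges : List (Int × Int)) : (usedLOf edges).Nodup :=
  ((PySem.List.sorted_perm _ _ _).nodup_iff).mpr (PySem.Set.nodup_ofList _)

theorem mem_usedL_iff (edges : List (Int × Int)) (v : Int) :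
    v ∈ usedLOf edges ↔ v ∈ usedOf edges :=
  (PySem.List.sorted_perm _ _ _).mem_iff

theorem endpoints_mem (edges : List (Int × Int)) (e : Int × Int) (he : e ∈ edges) :
    e.1 ∈ usedLOf edges ∧ e.2 ∈ usedLOf edges := by
  have h := endpoints_usedOf edges e he
  exact ⟨(mem_usedL_iff edges _).mpr h.1, (mem_usedL_iff edges _).mpr h.2⟩

theorem usedL_index_of_mem (edges : List (Int × Int)) (v : Int) (hv : v ∈ usedLOf edges) :
    ∃ k, ∃ _ : k < (usedLOf edges).length, (usedLOf edges)[k] = v :=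
  List.mem_iff_getElem.mp hv

theorem idm_spec (edges : List (Int × Int)) (k : Nat) (hk : k < (usedLOf edges).length) :
    PySem.Dict.getD (idmapOf edges) ((usedLOf edges)[k]) 0 = (k : Int) := by
  have hnd := usedL_nodup edges
  have hkeys2 : (List.map (fun p => p.2) (PySem.List.enumerate (usedLOf edges))).Nodup := by
    rw [PySem.List.map_snd_enumerate]; exact hnd
  have hitems : (idmapOf edges).items =
      List.map (fun p => (p.2, p.1)) (PySem.List.enumerate (usedLOf edges)) := by
    unfold idmapOf
    have h := PySem.Dict.items_foldl_insert_fresh (PySem.List.enumerate (usedLOf edges))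
      (fun p => p.2) (fun p => p.1) PySem.Dict.empty
      (fun a _ => PySem.Dict.contains_empty _) hkeys2
    simpa using h
  have hkeysnd : (idmapOf edges).keys.Nodup := by
    have hkeq : (idmapOf edges).keys = usedLOf edges := by
      simp only [PySem.Dict.keys, hitems, List.map_map]
      exact PySem.List.map_snd_enumerate (usedLOf edges) 0
    rw [hkeq]; exact hnd
  have hmem : (((usedLOf edges)[k], (k : Int)) : Int × Int) ∈ (idmapOf edges).items := by
    rw [hitems]
    refine List.mem_map.mpr ⟨((k : Int), (usedLOf edges)[k]), ?_, rfl⟩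
    exact (PySem.List.mem_enumerate_iff _ _ _).mpr ⟨k, hk, by simp⟩
  exact PySem.Dict.getD_of_mem_items _ hmem hkeysnd 0

theorem idm_eq_iff (edges : List (Int × Int)) (v : Int) (hv : v ∈ usedLOf edges)
    (m : Nat) (hm : m < (usedLOf edges).length) :
    PySem.Dict.getD (idmapOf edges) v 0 = (m : Int) ↔ v = (usedLOf edges)[m] := by
  obtain ⟨k, hk, hkv⟩ := usedL_index_of_mem edges v hv
  subst hkv
  rw [idm_spec edges k hk]
  constructor
  · intro h
    have : k = m := by exact_mod_cast h
    subst this; rfl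
  · intro h
    have : k = m := ((usedL_nodup edges).getElem_inj_iff).mp h
    exact_mod_cast congrArg (fun x : Nat => (x : Int)) this

theorem pyGetD_set_nat (g : List (PySem.Set Int)) (k : Nat) (hk : k < g.length)
    (s : PySem.Set Int) (m : Nat) :
    PySem.List.pyGetD (g.set k s) (m : Int) PySem.Set.empty =
      if m = k then s else PySem.List.pyGetD g (m : Int) PySem.Set.empty := by
  rw [PySem.List.pyGetD_natCast, PySem.List.pyGetD_natCast]
  by_cases h : m = k
  · subst h
    rw [if_pos rfl, List.getD_eq_getElem?_getD, List.getElem?_set_self hk]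
    rfl
  · rw [if_neg h, List.getD_eq_getElem?_getD, List.getD_eq_getElem?_getD,
      List.getElem?_set_ne (by omega : k ≠ m)]

theorem g0_len (edges : List (Int × Int)) : (g0Of edges).length = (usedLOf edges).length := by
  simp [g0Of]

theorem g0_flatten (edges : List (Int × Int)) : (g0Of edges).flatten = [] := by
  unfold g0Of
  induction usedLOf edges with
  | nil => rfl
  | cons x t ih => simpa [PySem.Set.empty] using ih

set_option maxHeartbeats 1000000 in
theorem g_char (edges0 : List (Int × Int)) : ∀ edges : List (Int × Int),
    (∀ e ∈ edges, e.1 ∈ usedLOf edges0 ∧ e.2 ∈ usedLOf edges0) →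
    ∀ g : List (PySem.Set Int), g.length = (usedLOf edges0).length →
    ∀ m : Nat, m < (usedLOf edges0).length → ∀ j : Int,
    (j ∈ PySem.List.pyGetD (edges.foldl (gStep (idmapOf edges0)) g) (m : Int) PySem.Set.empty ↔
      j ∈ PySem.List.pyGetD g (m : Int) PySem.Set.empty ∨
      ∃ e ∈ edges,
        (PySem.Dict.getD (idmapOf edges0) e.1 0 = (m : Int) ∧
         PySem.Dict.getD (idmapOf edges0) e.2 0 = j) ∨
        (PySem.Dict.getD (idmapOf edges0) e.2 0 = (m : Int) ∧
         PySem.Dict.getD (idmapOf edges0) e.1 0 = j)) := by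
  intro edges
  induction edges with
  | nil => intro _ g hg m hm j; simp
  | cons e t ih =>
    intro he g hg m hm j
    obtain ⟨ka, hka, hae⟩ := usedL_index_of_mem edges0 e.1 (he e (by simp)).1
    obtain ⟨kb, hkb, hbe⟩ := usedL_index_of_mem edges0 e.2 (he e (by simp)).2
    have hia : PySem.Dict.getD (idmapOf edges0) e.1 0 = (ka : Int) := by
      rw [← hae]; exact idm_spec edges0 ka hka
    have hib : PySem.Dict.getD (idmapOf edges0) e.2 0 = (kb : Int) := by
      rw [← hbe]; exact idm_spec edges0 kb hkb
    have hstep : gStep (idmapOf edges0) g e =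
        (g.set ka (PySem.Set.add (PySem.List.pyGetD g (ka : Int) PySem.Set.empty) (kb : Int))).set kb
          (PySem.Set.add (PySem.List.pyGetD
            (g.set ka (PySem.Set.add (PySem.List.pyGetD g (ka : Int) PySem.Set.empty) (kb : Int)))
            (kb : Int) PySem.Set.empty) (ka : Int)) := by
      simp only [gStep, hia, hib, Int.toNat_natCast]
    rw [List.foldl_cons, hstep]
    rw [ih (fun x hx => he x (List.mem_cons_of_mem e hx)) _
      (by rw [List.length_set, List.length_set]; exact hg) m hm j]
    have hseta : ∀ mm : Nat,
        PySem.List.pyGetD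
          (g.set ka (PySem.Set.add (PySem.List.pyGetD g (ka : Int) PySem.Set.empty) (kb : Int)))
          (mm : Int) PySem.Set.empty
        = if mm = ka then PySem.Set.add (PySem.List.pyGetD g (ka : Int) PySem.Set.empty) (kb : Int)
          else PySem.List.pyGetD g (mm : Int) PySem.Set.empty :=
      fun mm => pyGetD_set_nat g ka (by rw [hg]; exact hka) _ mm
    have hsetb :
        PySem.List.pyGetD
          ((g.set ka (PySem.Set.add (PySem.List.pyGetD g (ka : Int) PySem.Set.empty) (kb : Int))).set kb
            (PySem.Set.add (PySem.List.pyGetD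
              (g.set ka (PySem.Set.add (PySem.List.pyGetD g (ka : Int) PySem.Set.empty) (kb : Int)))
              (kb : Int) PySem.Set.empty) (ka : Int)))
          (m : Int) PySem.Set.empty
        = if m = kb then
            PySem.Set.add (PySem.List.pyGetD
              (g.set ka (PySem.Set.add (PySem.List.pyGetD g (ka : Int) PySem.Set.empty) (kb : Int)))
              (kb : Int) PySem.Set.empty) (ka : Int)
          else PySem.List.pyGetD
            (g.set ka (PySem.Set.add (PySem.List.pyGetD g (ka : Int) PySem.Set.empty) (kb : Int)))
            (m : Int) PySem.Set.empty :=
      pyGetD_set_nat _ kb (by rw [List.length_set, hg]; exact hkb) _ m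
    have key : j ∈ PySem.List.pyGetD
          ((g.set ka (PySem.Set.add (PySem.List.pyGetD g (ka : Int) PySem.Set.empty) (kb : Int))).set kb
            (PySem.Set.add (PySem.List.pyGetD
              (g.set ka (PySem.Set.add (PySem.List.pyGetD g (ka : Int) PySem.Set.empty) (kb : Int)))
              (kb : Int) PySem.Set.empty) (ka : Int)))
          (m : Int) PySem.Set.empty
        ↔ j ∈ PySem.List.pyGetD g (m : Int) PySem.Set.empty ∨
          (m = ka ∧ j = (kb : Int)) ∨ (m = kb ∧ j = (ka : Int)) := by
      rw [hsetb]
      by_cases hmb : m = kb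
      · subst hmb
        rw [if_pos rfl, hseta m]
        by_cases hma : m = ka
        · subst hma
          rw [if_pos rfl]
          simp [PySem.Set.mem_add]
          try tauto
        · rw [if_neg hma]
          simp [PySem.Set.mem_add, hma]
          try tauto
      · rw [if_neg hmb, hseta m]
        by_cases hma : m = ka
        · subst hma
          rw [if_pos rfl]
          simp [PySem.Set.mem_add, hmb]
          try tauto
        · rw [if_neg hma]
          simp [hma, hmb]
          try tauto
    rw [key, List.exists_mem_cons_iff, hia, hib]
    have c1 : ((ka : Int) = (m : Int)) ↔ m = ka := by omega
    have c2 : ((kb : Int) = (m : Int)) ↔ m = kb := by omega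
    have c3 : ((kb : Int) = j) ↔ (j = (kb : Int)) := eq_comm
    have c4 : ((ka : Int) = j) ↔ (j = (ka : Int)) := eq_comm
    rw [c1, c2, c3, c4]
    exact or_assoc

theorem flatten_set_mem {α : Type} (g : List (List α)) (k : Nat) (s : List α) :
    ∀ x ∈ (g.set k s).flatten, x ∈ s ∨ x ∈ g.flatten := by
  intro x hx
  rcases List.mem_flatten.mp hx with ⟨t, ht, hxt⟩
  rcases List.mem_or_eq_of_mem_set ht with h | h
  · exact Or.inr (List.mem_flatten.mpr ⟨t, h, hxt⟩)
  · subst h; exact Or.inl hxt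

theorem gF_flatten_bound (edges0 : List (Int × Int)) : ∀ edges : List (Int × Int),
    (∀ e ∈ edges, e.1 ∈ usedLOf edges0 ∧ e.2 ∈ usedLOf edges0) →
    ∀ g : List (PySem.Set Int),
    (∀ j ∈ g.flatten, ∃ k, k < (usedLOf edges0).length ∧ j = (k : Int)) →
    ∀ j ∈ (edges.foldl (gStep (idmapOf edges0)) g).flatten,
      ∃ k, k < (usedLOf edges0).length ∧ j = (k : Int) := by
  intro edges
  induction edges with
  | nil => intro _ g hbase j hj; exact hbase j hj
  | cons e t ih =>
    intro he g hbase
    rw [List.foldl_cons]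
    refine ih (fun x hx => he x (List.mem_cons_of_mem e hx)) (gStep (idmapOf edges0) g e) ?_
    intro j hj
    obtain ⟨ka, hka, hae⟩ := usedL_index_of_mem edges0 e.1 (he e (by simp)).1
    obtain ⟨kb, hkb, hbe⟩ := usedL_index_of_mem edges0 e.2 (he e (by simp)).2
    have hia : PySem.Dict.getD (idmapOf edges0) e.1 0 = (ka : Int) := by
      rw [← hae]; exact idm_spec edges0 ka hka
    have hib : PySem.Dict.getD (idmapOf edges0) e.2 0 = (kb : Int) := by
      rw [← hbe]; exact idm_spec edges0 kb hkb
    have hstep : gStep (idmapOf edges0) g e =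
        (g.set ka (PySem.Set.add (PySem.List.pyGetD g (ka : Int) PySem.Set.empty) (kb : Int))).set kb
          (PySem.Set.add (PySem.List.pyGetD
            (g.set ka (PySem.Set.add (PySem.List.pyGetD g (ka : Int) PySem.Set.empty) (kb : Int)))
            (kb : Int) PySem.Set.empty) (ka : Int)) := by
      simp only [gStep, hia, hib, Int.toNat_natCast]
    rw [hstep] at hj
    rcases flatten_set_mem _ _ _ j hj with h | h
    · rcases (PySem.Set.mem_add _ _ _).mp h with h' | rfl
      · have h2 := mem_pyGetD_flatten _ _ j h'
        rcases flatten_set_mem _ _ _ j h2 with h'' | h''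
        · rcases (PySem.Set.mem_add _ _ _).mp h'' with h3 | rfl
          · exact hbase j (mem_pyGetD_flatten g _ j h3)
          · exact ⟨kb, hkb, rfl⟩
        · exact hbase j h''
      · exact ⟨ka, hka, rfl⟩
    · rcases flatten_set_mem _ _ _ j h with h'' | h''
      · rcases (PySem.Set.mem_add _ _ _).mp h'' with h3 | rfl
        · exact hbase j (mem_pyGetD_flatten g _ j h3)
        · exact ⟨kb, hkb, rfl⟩
      · exact hbase j h''

theorem adjI_iff_adjV (edges : List (Int × Int)) (m k : Nat)
    (hm : m < (usedLOf edges).length) (hk : k < (usedLOf edges).length) :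
    AdjI (gFOf edges) (m : Int) (k : Int) ↔
      AdjV edges ((usedLOf edges)[m]) ((usedLOf edges)[k]) := by
  unfold AdjI gFOf
  rw [g_char edges edges (fun e he => endpoints_mem edges e he) (g0Of edges) (g0_len edges) m hm]
  have hbase : ∀ j : Int, j ∈ PySem.List.pyGetD (g0Of edges) (m : Int) PySem.Set.empty → False := by
    intro j hj
    have := mem_pyGetD_flatten _ _ j hj
    rw [g0_flatten] at this
    cases this
  constructor
  · rintro (h | ⟨e, he, hc⟩)
    · exact absurd h (hbase _)
    · have hme := endpoints_mem edges e he
      rcases hc with ⟨h1, h2⟩ | ⟨h1, h2⟩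
      · exact ⟨e, he, Or.inl ⟨(idm_eq_iff edges e.1 hme.1 m hm).mp h1,
          (idm_eq_iff edges e.2 hme.2 k hk).mp h2⟩⟩
      · exact ⟨e, he, Or.inr ⟨(idm_eq_iff edges e.2 hme.2 m hm).mp h1,
          (idm_eq_iff edges e.1 hme.1 k hk).mp h2⟩⟩
  · rintro ⟨e, he, hc⟩
    have hme := endpoints_mem edges e he
    right
    rcases hc with ⟨h1, h2⟩ | ⟨h1, h2⟩
    · exact ⟨e, he, Or.inl ⟨(idm_eq_iff edges e.1 hme.1 m hm).mpr h1,
        (idm_eq_iff edges e.2 hme.2 k hk).mpr h2⟩⟩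
    · exact ⟨e, he, Or.inr ⟨(idm_eq_iff edges e.2 hme.2 m hm).mpr h1,
        (idm_eq_iff edges e.1 hme.1 k hk).mpr h2⟩⟩

theorem gF_bound (edges : List (Int × Int)) :
    ∀ j ∈ (gFOf edges).flatten, ∃ k, k < (usedLOf edges).length ∧ j = (k : Int) := by
  unfold gFOf
  refine gF_flatten_bound edges edges (fun e he => endpoints_mem edges e he) (g0Of edges) ?_
  intro j hj
  rw [g0_flatten edges] at hj
  cases hj

theorem reachI_to_V (edges : List (Int × Int)) (hpos : 0 < (usedLOf edges).length) :
    ∀ x, ReachI (gFOf edges) 0 x →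
      ∃ k, ∃ hk : k < (usedLOf edges).length, x = (k : Int) ∧
        ReachV edges ((usedLOf edges)[0]) ((usedLOf edges)[k]) := by
  intro x hx
  induction hx with
  | refl => exact ⟨0, hpos, by simp, Relation.ReflTransGen.refl⟩
  | @tail b c hab hbc ih =>
    obtain ⟨p, hp, rfl, hR⟩ := ih
    obtain ⟨q, hq, rfl⟩ := gF_bound edges c (mem_pyGetD_flatten _ _ c hbc)
    exact ⟨q, hq, rfl,
      Relation.ReflTransGen.tail hR ((adjI_iff_adjV edges p q hp hq).mp hbc)⟩

theorem reachV_to_I (edges : List (Int × Int)) (hpos : 0 < (usedLOf edges).length) :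
    ∀ v, ReachV edges ((usedLOf edges)[0]) v → v ∈ usedLOf edges →
      ∃ k, ∃ hk : k < (usedLOf edges).length, (usedLOf edges)[k] = v ∧
        ReachI (gFOf edges) 0 (k : Int) := by
  intro v hv
  induction hv with
  | refl => intro _; exact ⟨0, hpos, rfl, Relation.ReflTransGen.refl⟩
  | @tail b c hab hbc ih =>
    intro hc
    obtain ⟨e, he, hcase⟩ := hbc
    have hbmem : b ∈ usedLOf edges := by
      rcases hcase with ⟨h1, _⟩ | ⟨h1, _⟩
      · exact h1 ▸ (endpoints_mem edges e he).1
      · exact h1 ▸ (endpoints_mem edges e he).2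
    obtain ⟨p, hp, hpv, hRI⟩ := ih hbmem
    obtain ⟨q, hq, hqv⟩ := usedL_index_of_mem edges c hc
    refine ⟨q, hq, hqv, Relation.ReflTransGen.tail hRI
      ((adjI_iff_adjV edges p q hp hq).mpr ?_)⟩
    rw [hpv, hqv]
    exact ⟨e, he, hcase⟩

theorem count_eq_iff (R base : List Int) (hnd : R.Nodup) (hbase : base.Nodup)
    (hsub : ∀ v ∈ R, v ∈ base) :
    R.length = base.length ↔ ∀ v ∈ base, v ∈ R := by
  constructor
  · intro h v hv
    exact ((List.subperm_of_subset hnd (fun x hx => hsub x hx)).perm_of_length_le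
      (le_of_eq h.symm)).mem_iff.mpr hv
  · intro h
    exact ((List.subperm_of_subset hnd (fun x hx => hsub x hx)).perm_of_length_le
      ((List.subperm_of_subset hbase (fun x hx => h x hx)).length_le)).length_eq

theorem reachV_mem_used (edges : List (Int × Int)) (root : Int) (hroot : root ∈ usedOf edges) :
    ∀ x, ReachV edges root x → x ∈ usedOf edges := by
  intro x hx
  induction hx with
  | refl => exact hroot
  | @tail b c hab hbc ih =>
    obtain ⟨e, he, hcase⟩ := hbc
    rcases hcase with ⟨_, rfl⟩ | ⟨_, rfl⟩
    · exact (endpoints_usedOf edges e he).2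
    · exact (endpoints_usedOf edges e he).1

theorem main_eq (nV : Int) (edges : List (Int × Int)) :
    connected_on_used nV edges = connected_on_used_alt nV edges := by
  rw [A_val, B_val]
  by_cases hempty : usedOf edges = []
  · have hL : usedLOf edges = [] := by
      unfold usedLOf; rw [PySem.List.sorted_eq_nil_iff]; exact hempty
    rw [if_pos hL, if_pos hempty]
  · have hLne : usedLOf edges ≠ [] := by
      intro h; exact hempty ((PySem.List.sorted_eq_nil_iff _ _ _).mp h)
    rw [if_neg hLne, if_neg hempty]
    have hpos : 0 < (usedLOf edges).length := List.length_pos_iff.mpr hLne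
    obtain ⟨m0, hm0⟩ : ∃ m0, PySem.List.min? (usedOf edges) (fun x => x) = some m0 := by
      cases h : PySem.List.min? (usedOf edges) (fun x => x)
      · exact absurd ((PySem.List.min?_eq_none_iff _ _).mp h) hempty
      · exact ⟨_, rfl⟩
    have hm0min := PySem.List.min?_isMin hm0
    have hm0mem := PySem.List.min?_mem hm0
    have hm0eq : m0 = (usedLOf edges)[0]'hpos := by
      apply le_antisymm
      · exact hm0min _ ((mem_usedL_iff edges _).mp (List.getElem_mem hpos))
      · obtain ⟨q, hq, hqv⟩ := usedL_index_of_mem edges m0 ((mem_usedL_iff edges m0).mpr hm0mem)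
        calc (usedLOf edges)[0]'hpos ≤ (usedLOf edges)[q]'hq :=
              PySem.List.sorted_id_getElem_mono (usedOf edges) (Nat.zero_le q) hq
          _ = m0 := hqv
    -- A's DFS result is exactly the ReachI-closure of index 0
    have hRmem : ∀ v, v ∈ dfsLoop (gFOf edges) (PySem.Set.ofList [0]) [0] ↔
        ReachI (gFOf edges) 0 v := by
      intro v
      constructor
      · refine dfsLoop_sound (gFOf edges) 0 _ _ ?_ ?_ v
        · intro x hx
          have : x = 0 := by simpa [PySem.Set.mem_ofList] using hx
          subst this; exact Relation.ReflTransGen.refl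
        · intro x hx
          have : x = 0 := List.mem_singleton.mp hx
          subst this; exact Relation.ReflTransGen.refl
      · intro hreach
        have hclosed := dfsLoop_closed (gFOf edges) (PySem.Set.ofList [0]) [0]
          (by intro x hx; simp [PySem.Set.mem_ofList, List.mem_singleton.mp hx])
          (by
            intro x hx hnx
            have : x = 0 := by simpa [PySem.Set.mem_ofList] using hx
            exact absurd (by simp [this]) hnx)
        induction hreach with
        | refl => exact dfsLoop_subset _ _ _ 0 (by simp [PySem.Set.mem_ofList])
        | @tail b c hab hbc ih => exact hclosed b ih c hbc
    have hRnodup : (dfsLoop (gFOf edges) (PySem.Set.ofList [0]) [0]).Nodup :=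
      dfsLoop_nodup _ _ _ (PySem.Set.nodup_ofList _)
    have hRbound : ∀ v ∈ dfsLoop (gFOf edges) (PySem.Set.ofList [0]) [0],
        ∃ k, k < (usedLOf edges).length ∧ v = (k : Int) := by
      intro v hv
      rcases dfsLoop_mem _ _ _ v hv with h | h
      · have : v = 0 := by simpa [PySem.Set.mem_ofList] using h
        exact ⟨0, hpos, by simp [this]⟩
      · exact gF_bound edges v h
    have hidxnodup : ((List.range (usedLOf edges).length).map (fun k : Nat => (k : Int))).Nodup := by
      refine List.Nodup.map ?_ (List.nodup_range)
      intro a b hab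
      have h' : (a : Int) = (b : Int) := hab
      exact_mod_cast h'
    have hidxmem : ∀ v : Int,
        v ∈ (List.range (usedLOf edges).length).map (fun k : Nat => (k : Int)) ↔
          ∃ k, k < (usedLOf edges).length ∧ v = (k : Int) := by
      intro v
      simp only [List.mem_map, List.mem_range]
      constructor
      · rintro ⟨k, hk, rfl⟩; exact ⟨k, hk, rfl⟩
      · rintro ⟨k, hk, rfl⟩; exact ⟨k, hk, rfl⟩
    have hlen_idx : ((List.range (usedLOf edges).length).map (fun k : Nat => (k : Int))).length
        = (usedLOf edges).length := by simp
    have hcnt := count_eq_iff (dfsLoop (gFOf edges) (PySem.Set.ofList [0]) [0])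
      ((List.range (usedLOf edges).length).map (fun k : Nat => (k : Int)))
      hRnodup hidxnodup (fun v hv => (hidxmem v).mpr (hRbound v hv))
    have hAiff : (dfsLoop (gFOf edges) (PySem.Set.ofList [0]) [0]).length = (usedLOf edges).length ↔
        ∀ k, k < (usedLOf edges).length → ReachI (gFOf edges) 0 (k : Int) := by
      constructor
      · intro h k hk
        have hall := hcnt.mp (by rw [hlen_idx]; exact h)
        exact (hRmem _).mp (hall _ ((hidxmem _).mpr ⟨k, hk, rfl⟩))
      · intro h
        rw [← hlen_idx]
        refine hcnt.mpr ?_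
        intro v hv
        obtain ⟨k, hk, rfl⟩ := (hidxmem v).mp hv
        exact (hRmem _).mpr (h k hk)
    -- B's fixpoint result is exactly the ReachV-closure of m0
    have hRbmem : ∀ v, v ∈ bloop edges (PySem.Set.ofList [m0]) ↔ ReachV edges m0 v := by
      intro v
      constructor
      · refine fun h => bloop_sound edges m0 _ ?_ v h
        intro x hx
        have : x = m0 := by simpa [PySem.Set.mem_ofList] using hx
        subst this; exact Relation.ReflTransGen.refl
      · exact fun h => bloop_complete edges m0 _ (by simp [PySem.Set.mem_ofList]) v h
    have hRbnodup : (bloop edges (PySem.Set.ofList [m0])).Nodup :=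
      bloop_nodup edges _ (PySem.Set.nodup_ofList _)
    have hRbsub : ∀ v ∈ bloop edges (PySem.Set.ofList [m0]), v ∈ usedOf edges :=
      fun v hv => reachV_mem_used edges m0 hm0mem v ((hRbmem v).mp hv)
    have husednodup : (usedOf edges).Nodup := by
      unfold usedOf; exact PySem.Set.nodup_ofList _
    have hBiff : (bloop edges (PySem.Set.ofList [m0])).length = (usedOf edges).length ↔
        ∀ v ∈ usedOf edges, ReachV edges m0 v := by
      rw [count_eq_iff _ _ hRbnodup husednodup hRbsub]
      constructor
      · exact fun h v hv => (hRbmem v).mp (h v hv)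
      · exact fun h v hv => (hRbmem v).mpr (h v hv)
    -- the bridge between the two closures
    have hcross : (∀ k, k < (usedLOf edges).length → ReachI (gFOf edges) 0 (k : Int)) ↔
        ∀ v ∈ usedOf edges, ReachV edges m0 v := by
      constructor
      · intro h v hv
        obtain ⟨k, hk, hkv⟩ := usedL_index_of_mem edges v ((mem_usedL_iff edges v).mpr hv)
        obtain ⟨k', hk', hcast, hRV⟩ := reachI_to_V edges hpos _ (h k hk)
        have hkk : k' = k := by exact_mod_cast hcast.symm
        subst hkk
        rw [hm0eq, ← hkv]
        exact hRV
      · intro h k hk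
        have hm := (mem_usedL_iff edges _).mp (List.getElem_mem hk)
        have hRV : ReachV edges ((usedLOf edges)[0]'hpos) ((usedLOf edges)[k]'hk) := by
          rw [← hm0eq]; exact h _ hm
        obtain ⟨k', hk', hkv, hRI⟩ := reachV_to_I edges hpos _ hRV (List.getElem_mem hk)
        have hkk : k' = k := ((usedL_nodup edges).getElem_inj_iff).mp hkv
        subst hkk
        exact hRI
    simp only [hm0, Option.getD_some]
    rw [decide_eq_decide]
    exact hAiff.trans (hcross.trans hBiff.symm)

-- ===== VERDICT (by name: the statement is the Claim_ definition above) =====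
theorem connected_on_used_spec : Claim_equal_connected_on_used := by
  intro nV subset_edges _
  unfold Spec_connected_on_used
  exact main_eq nV subset_edges
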